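-- pv_equiv track=rewrite | github.com/element154/SkillGym-develop | ready/task_t430_run2/tests/test_outputs.py | compute_l1_distance
-- ===== SOURCE A (Python) =====
-- from typing import Dict, List, Tuple
--
-- def compute_l1_distance(hist1: Dict[int, int], hist2: Dict[int, int]) -> int:
--     """
--     Compute L1 distance between two histograms.
--
--     L1 = sum over union of keys of |hist1[k] - hist2[k]|
--     Missing keys are treated as 0.
--     """
--     all_keys = set(hist1.keys()) | set(hist2.keys())
--     distance = 0
--     for k in all_keys:
--         v1 = hist1.get(k, 0)
--         v2 = hist2.get(k, 0)
--         distance += abs(v1 - v2)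
--     return distance
-- ===== SOURCE B (Python) =====
-- def compute_l1_distance(hist1, hist2):
--     # Sort-merge: signed items (hist2 negated) sorted by key, then one scan
--     # summing each run of equal keys and accumulating absolute run totals.
--     items = sorted(list(hist1.items()) + [(k, -v) for k, v in hist2.items()],
--                    key=lambda p: p[0])
--     if not items:
--         return 0
--     total = 0
--     k, s = items[0]
--     for k2, v in items[1:]:
--         if k2 == k:
--             s += v
--         else:
--             total += abs(s)
--             k, s = k2, v
--     return total + abs(s)
-- ===== Notes on version B (the rewrite author's own statement) =====
-- stated objective: alternative
-- what changed: Replaces the key-union set and per-key dict lookups by a sort-merge: hist1's items and hist2's negated items are concatenated, sorted by key, and one linear scan sums each run of equal keys and accumulates the absolute run totals; no union set and no get() lookups remain.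
import Mathlib
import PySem

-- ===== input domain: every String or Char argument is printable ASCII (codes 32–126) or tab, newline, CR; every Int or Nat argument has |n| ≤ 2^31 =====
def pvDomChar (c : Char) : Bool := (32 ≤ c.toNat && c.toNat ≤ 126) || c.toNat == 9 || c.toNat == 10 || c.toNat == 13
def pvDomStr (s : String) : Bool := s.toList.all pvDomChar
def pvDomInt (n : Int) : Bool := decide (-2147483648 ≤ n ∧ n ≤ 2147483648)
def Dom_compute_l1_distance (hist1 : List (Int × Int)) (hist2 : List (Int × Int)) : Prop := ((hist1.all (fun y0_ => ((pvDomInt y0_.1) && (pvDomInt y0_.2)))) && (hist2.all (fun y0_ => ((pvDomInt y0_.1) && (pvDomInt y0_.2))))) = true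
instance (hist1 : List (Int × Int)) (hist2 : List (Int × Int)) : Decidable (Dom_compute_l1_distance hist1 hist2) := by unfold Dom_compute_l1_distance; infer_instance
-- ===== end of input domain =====

-- B replaces A's key-union set and per-key dict lookups by a sort-merge:
-- hist1's items and hist2's negated items are sorted by key and one scan sums
-- each run of equal keys, accumulating absolute run totals (alternative algorithm).

-- ===== PORT A =====
def compute_l1_distance (hist1 : List (Int × Int)) (hist2 : List (Int × Int)) : Int :=
  -- all_keys = set(hist1.keys()) | set(hist2.keys())
  let all_keys : PySem.Set Int :=
    PySem.Set.union (PySem.Set.ofList (PySem.Dict.mk hist1).keys)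
                    (PySem.Set.ofList (PySem.Dict.mk hist2).keys)
  -- for k in all_keys: distance += abs(hist1.get(k,0) - hist2.get(k,0))
  -- (sum over the set: order-independent, so the fold over the Set list is exact)
  all_keys.foldl (fun distance k =>
    distance + |(PySem.Dict.mk hist1).getD k 0 - (PySem.Dict.mk hist2).getD k 0|) 0

-- ===== PORT B =====
-- the scan loop: total/current key/current run sum, one pass over the remaining items
def pvScan : Int → Int → Int → List (Int × Int) → Int
  | total, _, s, [] => total + |s|
  | total, k, s, (k2, v) :: rest =>
      if k2 = k then pvScan total k (s + v) rest
      else pvScan (total + |s|) k2 v rest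

def compute_l1_distance_alt (hist1 : List (Int × Int)) (hist2 : List (Int × Int)) : Int :=
  -- items = sorted(hist1.items() + [(k, -v) for k, v in hist2.items()], key=fst)
  let items := PySem.List.sorted (hist1 ++ hist2.map (fun p => (p.1, -p.2))) (fun p => p.1) false
  match items with
  | [] => 0
  | (k, s) :: rest => pvScan 0 k s rest

-- ===== PRECONDITION & SPEC =====
-- Pre_ only excludes association lists with duplicate keys, which do not represent
-- a Python dict (every argument A actually accepts is a dict, whose keys are unique).
def Pre_compute_l1_distance (hist1 : List (Int × Int)) (hist2 : List (Int × Int)) : Prop :=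
  (hist1.map Prod.fst).Nodup ∧ (hist2.map Prod.fst).Nodup
instance (hist1 : List (Int × Int)) (hist2 : List (Int × Int)) : Decidable (Pre_compute_l1_distance hist1 hist2) := by unfold Pre_compute_l1_distance; infer_instance
def pvWitness_compute_l1_distance : (List (Int × Int)) × (List (Int × Int)) := ([(1, 2)], [(1, 5), (2, 3)])

def Spec_compute_l1_distance (hist1 : List (Int × Int)) (hist2 : List (Int × Int)) (out : Int) : Prop := out = compute_l1_distance_alt hist1 hist2
instance (hist1 : List (Int × Int)) (hist2 : List (Int × Int)) (out : Int) : Decidable (Spec_compute_l1_distance hist1 hist2 out) := by unfold Spec_compute_l1_distance; infer_instance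

-- ===== CLAIM (what is proved, stated in full; the proofs are below) =====
def Claim_equal_compute_l1_distance : Prop := ∀ (hist1 : List (Int × Int)) (hist2 : List (Int × Int)), Dom_compute_l1_distance hist1 hist2 → Pre_compute_l1_distance hist1 hist2 → Spec_compute_l1_distance hist1 hist2 (compute_l1_distance hist1 hist2)

-- ===== LEMMAS AND PROOFS =====

-- sum of the values carrying key k
def pvSumK (k : Int) (m : List (Int × Int)) : Int :=
  ((m.filter (fun p => p.1 == k)).map Prod.snd).sum

-- the scan started on the first item (B's body after sorting)
def pvB0 : List (Int × Int) → Int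
  | [] => 0
  | (k, v) :: rest => pvScan 0 k v rest

theorem pvScan_shift (m : List (Int × Int)) : ∀ (t k s : Int),
    pvScan t k s m = t + pvScan 0 k s m := by
  induction m with
  | nil => intro t k s; show t + |s| = t + (0 + |s|); rw [zero_add]
  | cons p rest ih =>
      intro t k s
      obtain ⟨k2, v⟩ := p
      show (if k2 = k then pvScan t k (s + v) rest else pvScan (t + |s|) k2 v rest)
          = t + (if k2 = k then pvScan 0 k (s + v) rest else pvScan (0 + |s|) k2 v rest)
      by_cases h : k2 = k
      · rw [if_pos h, if_pos h, ih]
      · rw [if_neg h, if_neg h, ih (t + |s|), ih (0 + |s|), zero_add, add_assoc]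

theorem pvScan_sorted (m : List (Int × Int))
    (hp : m.Pairwise (fun p q => p.1 ≤ q.1)) :
    ∀ (k : Int), (∀ p ∈ m, k ≤ p.1) → ∀ (t s : Int),
    pvScan t k s m = t + |s + pvSumK k m| + pvB0 (m.filter (fun p => p.1 != k)) := by
  induction m with
  | nil =>
      intro k _ t s
      show t + |s| = t + |s + pvSumK k []| + pvB0 []
      simp only [pvSumK, pvB0, List.filter_nil, List.map_nil, List.sum_nil]
      rw [add_zero, add_zero]
  | cons p rest ih =>
      intro k hk t s
      obtain ⟨k2, v⟩ := p
      rw [List.pairwise_cons] at hp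
      by_cases h : k2 = k
      · subst h
        have hstep : pvScan t k2 s ((k2, v) :: rest) = pvScan t k2 (s + v) rest := by
          show (if k2 = k2 then pvScan t k2 (s + v) rest else pvScan (t + |s|) k2 v rest) = _
          rw [if_pos rfl]
        rw [hstep]
        rw [ih hp.2 k2 hp.1 t (s + v)]
        have hsum : pvSumK k2 ((k2, v) :: rest) = v + pvSumK k2 rest := by
          simp [pvSumK]
        have hfil : ((k2, v) :: rest).filter (fun p => p.1 != k2)
            = rest.filter (fun p => p.1 != k2) := by
          simp [List.filter]
        rw [hsum, hfil, add_assoc s v]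
      · have hk2 : k < k2 := lt_of_le_of_ne (hk _ (List.mem_cons_self)) (Ne.symm h)
        have hne : ∀ p ∈ rest, p.1 ≠ k := by
          intro p hpmem
          have := hp.1 p hpmem
          omega
        have hsum : pvSumK k ((k2, v) :: rest) = 0 := by
          have hfil0 : ((k2, v) :: rest).filter (fun p => p.1 == k) = [] := by
            apply List.filter_eq_nil_iff.mpr
            intro p hpmem
            rcases List.mem_cons.mp hpmem with rfl | hm
            · simp [h]
            · simp [hne p hm]
          simp [pvSumK, hfil0]
        have hfil : ((k2, v) :: rest).filter (fun p => p.1 != k) = (k2, v) :: rest := by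
          apply List.filter_eq_self.mpr
          intro p hpmem
          rcases List.mem_cons.mp hpmem with rfl | hm
          · simp [h]
          · simp [hne p hm]
        have hstep : pvScan t k s ((k2, v) :: rest) = pvScan (t + |s|) k2 v rest := by
          show (if k2 = k then pvScan t k (s + v) rest else pvScan (t + |s|) k2 v rest) = _
          rw [if_neg h]
        rw [hstep]
        rw [hsum, hfil, pvScan_shift]
        show t + |s| + pvScan 0 k2 v rest = t + |s + 0| + pvScan 0 k2 v rest
        rw [add_zero]

-- after filtering key k away, per-key sums are unchanged for keys ≠ k
theorem pvSumK_filter_ne (k k' : Int) (h : k' ≠ k) (m : List (Int × Int)) :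
    pvSumK k' (m.filter (fun p => p.1 != k)) = pvSumK k' m := by
  have hfil : (m.filter (fun p => p.1 != k)).filter (fun p => p.1 == k')
      = m.filter (fun p => p.1 == k') := by
    rw [List.filter_filter]
    apply List.filter_congr
    intro p _
    by_cases hp : p.1 = k' <;> simp [hp, h]
  unfold pvSumK
  rw [hfil]

-- the scan on a key-sorted list = sum of |per-key value total| over the distinct keys
theorem pvB0_sorted (m : List (Int × Int))
    (hp : m.Pairwise (fun p q => p.1 ≤ q.1)) :
    pvB0 m = ((PySem.Set.ofList (m.map Prod.fst)).map (fun k => |pvSumK k m|)).sum := by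
  match m with
  | [] => simp [pvB0, PySem.Set.ofList_nil]
  | (k, v) :: r =>
    rw [List.pairwise_cons] at hp
    have step : pvB0 ((k, v) :: r)
        = |v + pvSumK k r| + pvB0 (r.filter (fun p => p.1 != k)) := by
      show pvScan 0 k v r = _
      rw [pvScan_sorted r hp.2 k hp.1 0 v, zero_add]
    have hlen : (r.filter (fun p => p.1 != k)).length < ((k, v) :: r).length :=
      Nat.lt_succ_of_le (List.length_filter_le _ _)
    have ihr := pvB0_sorted (r.filter (fun p => p.1 != k)) (hp.2.filter _)
    rw [step, ihr]
    -- rewrite the inner sums to be over the full list m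
    have hcongr : ((PySem.Set.ofList ((r.filter (fun p => p.1 != k)).map Prod.fst)).map
          (fun k' => |pvSumK k' (r.filter (fun p => p.1 != k))|)).sum
        = ((PySem.Set.ofList ((r.filter (fun p => p.1 != k)).map Prod.fst)).map
          (fun k' => |pvSumK k' ((k, v) :: r)|)).sum := by
      congr 1
      apply List.map_congr_left
      intro k' hk'
      have hk'ne : k' ≠ k := by
        rcases List.mem_map.mp ((PySem.Set.mem_ofList _ _).mp hk') with ⟨p, hpm, rfl⟩
        have := List.of_mem_filter hpm
        simpa using this
      rw [pvSumK_filter_ne k k' hk'ne r]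
      have hcons : pvSumK k' ((k, v) :: r) = pvSumK k' r := by
        simp [pvSumK, List.filter, show (k == k') = false by simp [Ne.symm hk'ne]]
      rw [hcons]
    rw [hcongr]
    have hsumk : pvSumK k ((k, v) :: r) = v + pvSumK k r := by simp [pvSumK]
    -- the two key lists are permutations
    have hperm : (k :: PySem.Set.ofList ((r.filter (fun p => p.1 != k)).map Prod.fst)).Perm
        (PySem.Set.ofList (((k, v) :: r).map Prod.fst)) := by
      have hnd1 : (k :: PySem.Set.ofList ((r.filter (fun p => p.1 != k)).map Prod.fst)).Nodup := by
        refine List.nodup_cons.mpr ⟨?_, PySem.Set.nodup_ofList _⟩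
        intro hmem
        rcases List.mem_map.mp ((PySem.Set.mem_ofList _ _).mp hmem) with ⟨p, hpm, hpk⟩
        have := List.of_mem_filter hpm
        simp [hpk] at this
      refine (List.perm_ext_iff_of_nodup hnd1 (PySem.Set.nodup_ofList _)).mpr ?_
      intro x
      rw [List.mem_cons, PySem.Set.mem_ofList, PySem.Set.mem_ofList, List.map_cons,
        List.mem_cons]
      constructor
      · rintro (rfl | hx)
        · exact Or.inl rfl
        · rcases List.mem_map.mp hx with ⟨p, hpm, rfl⟩
          exact Or.inr (List.mem_map_of_mem (List.mem_of_mem_filter hpm))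
      · rintro (rfl | hx)
        · exact Or.inl rfl
        · rcases List.mem_map.mp hx with ⟨p, hpm, rfl⟩
          by_cases hpk : p.1 = k
          · exact Or.inl hpk
          · exact Or.inr (List.mem_map_of_mem
              (List.mem_filter.mpr ⟨hpm, by simp [hpk]⟩))
    calc |v + pvSumK k r|
          + ((PySem.Set.ofList ((r.filter (fun p => p.1 != k)).map Prod.fst)).map
              (fun k' => |pvSumK k' ((k, v) :: r)|)).sum
        = ((k :: PySem.Set.ofList ((r.filter (fun p => p.1 != k)).map Prod.fst)).map
              (fun k' => |pvSumK k' ((k, v) :: r)|)).sum := by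
          simp [hsumk]
      _ = _ := ((hperm.map _).sum_eq)
termination_by m.length
decreasing_by simpa using hlen

-- with unique keys, the per-key value total is the dict lookup
theorem pvSumK_nodup (m : List (Int × Int)) (hnd : (m.map Prod.fst).Nodup) (k : Int) :
    pvSumK k m = (PySem.Dict.mk m).getD k 0 := by
  induction m with
  | nil => simp [pvSumK, PySem.Dict.getD, PySem.Dict.get?]
  | cons p rest ih =>
      obtain ⟨a, b⟩ := p
      simp only [List.map_cons, List.nodup_cons] at hnd
      by_cases h : a = k
      · subst h
        have hfil : rest.filter (fun p => p.1 == a) = [] := by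
          apply List.filter_eq_nil_iff.mpr
          intro p hpmem
          have hm : p.1 ∈ rest.map Prod.fst := List.mem_map_of_mem hpmem
          simp only [beq_iff_eq]
          intro hc
          exact hnd.1 (hc ▸ hm)
        simp [pvSumK, hfil, PySem.Dict.getD_eq_get?_getD, PySem.Dict.get?_mk_cons]
      · have ht := ih hnd.2
        simp only [pvSumK] at ht
        simp [pvSumK, List.filter, show (a == k) = false by simp [h], ht,
          PySem.Dict.getD_eq_get?_getD, PySem.Dict.get?_mk_cons]

-- negating the values negates the per-key total
theorem pvSumK_neg (m : List (Int × Int)) (k : Int) :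
    pvSumK k (m.map (fun p => (p.1, -p.2))) = -pvSumK k m := by
  induction m with
  | nil => simp [pvSumK]
  | cons p rest ih =>
      obtain ⟨a, b⟩ := p
      by_cases h : a = k
      · simp only [pvSumK, List.map_cons] at *
        simp [List.filter, h] at *
        omega
      · simp only [pvSumK, List.map_cons] at *
        simp [List.filter, show (a == k) = false by simp [h]] at *
        exact ih

theorem compute_l1_distance_eq (hist1 : List (Int × Int)) (hist2 : List (Int × Int))
    (nd1 : (hist1.map Prod.fst).Nodup) (nd2 : (hist2.map Prod.fst).Nodup) :
    compute_l1_distance hist1 hist2 = compute_l1_distance_alt hist1 hist2 := by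
  unfold compute_l1_distance compute_l1_distance_alt
  set l := hist1 ++ hist2.map (fun p => (p.1, -p.2)) with hl
  set sl := PySem.List.sorted l (fun p => p.1) false with hsl
  have hpair : sl.Pairwise (fun p q => p.1 ≤ q.1) := PySem.List.sorted_pairwise l _
  have hperm : sl.Perm l := PySem.List.sorted_perm l _ _
  -- B is pvB0 of the sorted list
  have hB : (match sl with
      | [] => (0 : Int)
      | (k, s) :: rest => pvScan 0 k s rest) = pvB0 sl := by
    cases sl with
    | nil => rfl
    | cons p rest => obtain ⟨k, s⟩ := p; rfl
  rw [hB, pvB0_sorted sl hpair]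
  -- A as a mapped sum over the union key set
  rw [PySem.List.foldl_add, zero_add]
  -- per-key totals over the sorted list = per-key totals over l = dict difference
  have hSumK : ∀ k : Int, pvSumK k sl
      = (PySem.Dict.mk hist1).getD k 0 - (PySem.Dict.mk hist2).getD k 0 := by
    intro k
    have h1 : pvSumK k sl = pvSumK k l := by
      unfold pvSumK
      exact ((hperm.filter _).map _).sum_eq
    have h2 : pvSumK k l
        = pvSumK k hist1 + pvSumK k (hist2.map (fun p => (p.1, -p.2))) := by
      unfold pvSumK
      rw [hl, List.filter_append, List.map_append, List.sum_append]
    rw [h1, h2, pvSumK_neg, pvSumK_nodup hist1 nd1, pvSumK_nodup hist2 nd2,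
      ← sub_eq_add_neg]
  have hmapeq : ((PySem.Set.ofList (sl.map Prod.fst)).map (fun k => |pvSumK k sl|)).sum
      = ((PySem.Set.ofList (sl.map Prod.fst)).map (fun k =>
          |(PySem.Dict.mk hist1).getD k 0 - (PySem.Dict.mk hist2).getD k 0|)).sum := by
    congr 1
    apply List.map_congr_left
    intro k _
    rw [hSumK k]
  rw [hmapeq]
  -- the two key lists are permutations (both nodup, same members)
  have hkeys1 : (PySem.Dict.mk hist1).keys = hist1.map Prod.fst := by
    simp [PySem.Dict.keys]
  have hkeys2 : (PySem.Dict.mk hist2).keys = hist2.map Prod.fst := by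
    simp [PySem.Dict.keys]
  have hpermkeys : (PySem.Set.union (PySem.Set.ofList (PySem.Dict.mk hist1).keys)
        (PySem.Set.ofList (PySem.Dict.mk hist2).keys)).Perm
      (PySem.Set.ofList (sl.map Prod.fst)) := by
    refine (List.perm_ext_iff_of_nodup
      (PySem.Set.nodup_union _ _ (PySem.Set.nodup_ofList _))
      (PySem.Set.nodup_ofList _)).mpr ?_
    intro x
    rw [PySem.Set.mem_union, PySem.Set.mem_ofList, PySem.Set.mem_ofList,
      PySem.Set.mem_ofList, hkeys1, hkeys2]
    rw [(hperm.map Prod.fst).mem_iff, hl, List.map_append, List.mem_append,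
      List.map_map]
    have hcomp : (Prod.fst ∘ fun p : Int × Int => (p.1, -p.2)) = Prod.fst := rfl
    rw [hcomp]
  exact (hpermkeys.map _).sum_eq

-- ===== VERDICT (by name: the statement is the Claim_ definition above) =====
theorem compute_l1_distance_spec : Claim_equal_compute_l1_distance := by
  intro hist1 hist2 _ hpre
  exact compute_l1_distance_eq hist1 hist2 hpre.1 hpre.2
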